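-- pv_equiv track=rewrite | github.com/Hebbe1234/ExpectAll | src/topology.py | get_overlapping_channels
-- ===== SOURCE A (Python) =====
-- def get_overlapping_channels(demand_channels: dict[int, list[list[int]]]):
--     unique_channels = []
--
--     for channels in demand_channels.values():
--         for channel in channels:
--             if channel not in unique_channels:
--                 unique_channels.append(channel)
--
--     overlapping_channels = []
--
--     # Precompute sets and their lengths
--     unique_sets = [set(channel) for channel in unique_channels]
--     set_lengths = [len(channel_set) for channel_set in unique_sets]
--     num_unique_channels = len(unique_sets)
--     # Iterate over unique pairs of channels
--     for i in range(num_unique_channels):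
--         channel_set_i = unique_sets[i]
--         length_i = set_lengths[i]
--         for j in range(i, num_unique_channels):
--
--             length_j = set_lengths[j]
--             combined_set_length = length_i + length_j - sum(1 for _ in (channel_set_i & unique_sets[j]))
--
--             if combined_set_length < length_i + length_j:
--                 overlapping_channels.append((i, j))
--                 overlapping_channels.append((j, i))
--
--     return overlapping_channels, unique_channels
-- ===== SOURCE B (Python) =====
-- def get_overlapping_channels(demand_channels):
--     # Dedup channels via a hash set of tuples; then use an inverted index
--     # element -> set of channel indices to find overlapping pairs without
--     # comparing every pair of channels.
--     unique_channels = []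
--     seen = set()
--     for channels in demand_channels.values():
--         for channel in channels:
--             key = tuple(channel)
--             if key not in seen:
--                 seen.add(key)
--                 unique_channels.append(channel)
--
--     index = {}
--     for i, channel in enumerate(unique_channels):
--         for x in channel:
--             index.setdefault(x, set()).add(i)
--
--     overlapping_channels = []
--     for i, channel in enumerate(unique_channels):
--         partners = set()
--         for x in channel:
--             partners |= index[x]
--         for j in sorted(p for p in partners if p >= i):
--             overlapping_channels.append((i, j))
--             overlapping_channels.append((j, i))
--
--     return overlapping_channels, unique_channels
-- ===== Notes on version B (the rewrite author's own statement) =====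
-- stated objective: faster
-- what changed: Replaces A's all-pairs set-intersection scan with an inverted index (element -> set of channel indices): each channel's overlap partners are the union of the index entries of its elements, sorted per channel; dedup of channels uses a hash set of tuples instead of repeated list membership scans.
import Mathlib
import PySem

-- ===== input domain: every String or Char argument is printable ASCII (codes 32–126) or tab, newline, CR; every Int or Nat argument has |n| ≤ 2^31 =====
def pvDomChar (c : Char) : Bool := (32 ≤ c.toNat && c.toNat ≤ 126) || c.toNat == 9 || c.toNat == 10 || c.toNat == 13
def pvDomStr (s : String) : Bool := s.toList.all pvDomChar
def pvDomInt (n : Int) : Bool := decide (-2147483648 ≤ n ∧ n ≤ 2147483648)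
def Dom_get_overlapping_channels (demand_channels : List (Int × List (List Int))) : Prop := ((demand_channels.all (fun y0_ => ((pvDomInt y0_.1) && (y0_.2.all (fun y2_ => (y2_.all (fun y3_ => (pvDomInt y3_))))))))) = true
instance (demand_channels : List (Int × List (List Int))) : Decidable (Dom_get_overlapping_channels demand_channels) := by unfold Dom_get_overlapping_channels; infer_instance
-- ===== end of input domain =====

-- B replaces A's all-pairs set-intersection scan by an inverted index element -> set of
-- channel indices (and hash-set dedup of the channels); proved to return A's exact value.

-- shared input-reading step: the Python argument is a dict; build it from the association
-- list (later value for a repeated key wins, first position kept) and take its .values()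
def pvDictValues (dc : List (Int × List (List Int))) : List (List (List Int)) :=
  (dc.foldl (fun d kv => d.insert kv.1 kv.2) PySem.Dict.empty).values

-- ===== PORT A =====
def pvA_dedup (vals : List (List (List Int))) : List (List Int) :=
  vals.foldl (fun u channels =>
    channels.foldl (fun u channel => if channel ∈ u then u else u ++ [channel]) u) []

def pvA_pairs (unique_sets : List (PySem.Set Int)) (set_lengths : List Int) (n : Int) :
    List (Int × Int) :=
  (PySem.List.pyRange 0 n).foldl (fun acc i =>
    let channel_set_i := PySem.List.pyGetD unique_sets i []
    let length_i := PySem.List.pyGetD set_lengths i 0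
    (PySem.List.pyRange i n).foldl (fun acc j =>
      let length_j := PySem.List.pyGetD set_lengths j 0
      let combined := length_i + length_j -
        ((channel_set_i.inter (PySem.List.pyGetD unique_sets j [])).map (fun _ => (1 : Int))).sum
      if combined < length_i + length_j then acc ++ [(i, j)] ++ [(j, i)] else acc) acc) []

def get_overlapping_channels (demand_channels : List (Int × List (List Int))) :
    (List (Int × Int)) × List (List Int) :=
  let unique_channels := pvA_dedup (pvDictValues demand_channels)
  let unique_sets := unique_channels.map PySem.Set.ofList
  let set_lengths := unique_sets.map PySem.Set.len
  (pvA_pairs unique_sets set_lengths (PySem.List.len unique_sets), unique_channels)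

-- ===== PORT B =====
def pvB_dedup (vals : List (List (List Int))) : List (List Int) × PySem.Set (List Int) :=
  vals.foldl (fun st channels =>
    channels.foldl (fun st channel =>
      if st.2.contains channel then st else (st.1 ++ [channel], st.2.add channel)) st)
    ([], PySem.Set.empty)

def pvB_index (unique_channels : List (List Int)) : PySem.Dict Int (PySem.Set Int) :=
  (PySem.List.enumerate unique_channels).foldl (fun d p =>
    p.2.foldl (fun d x => d.modify x PySem.Set.empty (fun s => s.add p.1)) d) PySem.Dict.empty

def pvB_partners (index : PySem.Dict Int (PySem.Set Int)) (channel : List Int) : PySem.Set Int :=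
  channel.foldl (fun s x => s.union (index.getD x PySem.Set.empty)) PySem.Set.empty

def get_overlapping_channels_alt (demand_channels : List (Int × List (List Int))) :
    (List (Int × Int)) × List (List Int) :=
  let unique_channels := (pvB_dedup (pvDictValues demand_channels)).1
  let index := pvB_index unique_channels
  let overlapping_channels :=
    (PySem.List.enumerate unique_channels).foldl (fun acc p =>
      (PySem.List.sorted ((pvB_partners index p.2).filter (fun q => decide (p.1 ≤ q)))
          (fun x => x)).foldl
        (fun acc j => acc ++ [(p.1, j)] ++ [(j, p.1)]) acc) []
  (overlapping_channels, unique_channels)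

-- ===== PRECONDITION & SPEC =====
def Spec_get_overlapping_channels (demand_channels : List (Int × List (List Int))) (out : (List (Int × Int)) × List (List Int)) : Prop := out = get_overlapping_channels_alt demand_channels
instance (demand_channels : List (Int × List (List Int))) (out : (List (Int × Int)) × List (List Int)) : Decidable (Spec_get_overlapping_channels demand_channels out) := by unfold Spec_get_overlapping_channels; infer_instance

-- ===== CLAIM (what is proved, stated in full; the proofs are below) =====
def Claim_equal_get_overlapping_channels : Prop := ∀ (demand_channels : List (Int × List (List Int))), Dom_get_overlapping_channels demand_channels → Spec_get_overlapping_channels demand_channels (get_overlapping_channels demand_channels)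

-- ===== LEMMAS AND PROOFS =====

-- B's dedup loop carries the set of already-seen channels; it always equals the output list
theorem pvB_dedup_inner (channels : List (List Int)) (u : List (List Int)) :
    channels.foldl (fun st channel =>
      if st.2.contains channel then st else (st.1 ++ [channel], st.2.add channel))
      ((u, u) : List (List Int) × PySem.Set (List Int)) =
    (channels.foldl (fun u channel => if channel ∈ u then u else u ++ [channel]) u,
     channels.foldl (fun u channel => if channel ∈ u then u else u ++ [channel]) u) := by
  induction channels generalizing u with
  | nil => rfl
  | cons c t ih =>
    simp only [List.foldl_cons]
    by_cases h : c ∈ u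
    · have hc : PySem.Set.contains u c = true := by simp [PySem.Set.contains, h]
      simp only [hc, h, if_true]
      exact ih u
    · have hc : PySem.Set.contains u c = false := by simp [PySem.Set.contains, h]
      have ha : PySem.Set.add u c = u ++ [c] := by simp [PySem.Set.add, PySem.Set.contains, h]
      simp only [hc, h, Bool.false_eq_true, if_false, ha]
      exact ih (u ++ [c])

theorem pvB_dedup_eq (vals : List (List (List Int))) :
    pvB_dedup vals = (pvA_dedup vals, pvA_dedup vals) := by
  unfold pvB_dedup pvA_dedup
  suffices h : ∀ u : List (List Int),
      vals.foldl (fun st channels => channels.foldl (fun st channel =>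
        if st.2.contains channel then st else (st.1 ++ [channel], st.2.add channel)) st)
        ((u, u) : List (List Int) × PySem.Set (List Int)) =
      (vals.foldl (fun u channels =>
        channels.foldl (fun u channel => if channel ∈ u then u else u ++ [channel]) u) u,
       vals.foldl (fun u channels =>
        channels.foldl (fun u channel => if channel ∈ u then u else u ++ [channel]) u) u) by
    exact h []
  induction vals with
  | nil => intro u; rfl
  | cons c t ih =>
    intro u
    simp only [List.foldl_cons, pvB_dedup_inner]
    exact ih _

-- membership in one channel's pass over the inverted index
theorem pvB_index_inner (ch : List Int) (d : PySem.Dict Int (PySem.Set Int)) (i x j : Int) :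
    j ∈ (ch.foldl (fun d x => d.modify x PySem.Set.empty (fun s => s.add i)) d).getD x
        PySem.Set.empty ↔
      j ∈ d.getD x PySem.Set.empty ∨ (j = i ∧ x ∈ ch) := by
  induction ch generalizing d with
  | nil => simp
  | cons c t ih =>
    rw [List.foldl_cons, ih]
    by_cases hx : x = c
    · subst hx
      rw [PySem.Dict.getD_modify_self, PySem.Set.mem_add]
      simp only [List.mem_cons]
      tauto
    · rw [PySem.Dict.getD_modify_of_ne d PySem.Set.empty _ hx]
      simp only [List.mem_cons]
      tauto

-- membership in the inverted index: exactly the indices of channels containing x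
theorem pvB_index_mem_aux (U : List (List Int)) (s : Int)
    (d : PySem.Dict Int (PySem.Set Int)) (x j : Int) :
    j ∈ ((PySem.List.enumerate U s).foldl (fun d p =>
        p.2.foldl (fun d x => d.modify x PySem.Set.empty (fun s => s.add p.1)) d) d).getD x
        PySem.Set.empty ↔
      j ∈ d.getD x PySem.Set.empty ∨
        ∃ k : Nat, ∃ _ : k < U.length, j = s + (k : Int) ∧ x ∈ U[k] := by
  induction U generalizing s d with
  | nil => simp [PySem.List.enumerate_nil]
  | cons c t ih =>
    rw [PySem.List.enumerate_cons, List.foldl_cons, ih, pvB_index_inner]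
    constructor
    · rintro (((h | ⟨hj, hx⟩) | ⟨k, hk, hj, hx⟩))
      · exact Or.inl h
      · exact Or.inr ⟨0, by simp, by simpa using hj, by simpa using hx⟩
      · exact Or.inr ⟨k + 1, by simpa using hk, by push_cast at hj ⊢; omega, by simpa using hx⟩
    · rintro (h | ⟨k, hk, hj, hx⟩)
      · exact Or.inl (Or.inl h)
      · cases k with
        | zero => exact Or.inl (Or.inr ⟨by simpa using hj, by simpa using hx⟩)
        | succ m =>
          exact Or.inr ⟨m, by simpa using hk, by push_cast at hj ⊢; omega, by simpa using hx⟩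

theorem pvB_index_mem (U : List (List Int)) (x j : Int) :
    j ∈ (pvB_index U).getD x PySem.Set.empty ↔
      ∃ k : Nat, ∃ _ : k < U.length, j = (k : Int) ∧ x ∈ U[k] := by
  unfold pvB_index
  have he : (PySem.Dict.empty : PySem.Dict Int (PySem.Set Int)).getD x PySem.Set.empty = [] :=
    rfl
  rw [pvB_index_mem_aux, he]
  simp

theorem pvB_partners_mem_aux (index : PySem.Dict Int (PySem.Set Int)) (ch : List Int)
    (s0 : PySem.Set Int) (j : Int) :
    j ∈ ch.foldl (fun s x => s.union (index.getD x PySem.Set.empty)) s0 ↔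
      j ∈ s0 ∨ ∃ x ∈ ch, j ∈ index.getD x PySem.Set.empty := by
  induction ch generalizing s0 with
  | nil => simp
  | cons c t ih =>
    rw [List.foldl_cons, ih, PySem.Set.mem_union]
    simp only [List.mem_cons]
    constructor
    · rintro ((h | h) | ⟨x, hx, hj⟩)
      · exact Or.inl h
      · exact Or.inr ⟨c, Or.inl rfl, h⟩
      · exact Or.inr ⟨x, Or.inr hx, hj⟩
    · rintro (h | ⟨x, (rfl | hx), hj⟩)
      · exact Or.inl (Or.inl h)
      · exact Or.inl (Or.inr hj)
      · exact Or.inr ⟨x, hx, hj⟩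

theorem pvB_partners_mem (index : PySem.Dict Int (PySem.Set Int)) (ch : List Int) (j : Int) :
    j ∈ pvB_partners index ch ↔ ∃ x ∈ ch, j ∈ index.getD x PySem.Set.empty := by
  unfold pvB_partners
  rw [pvB_partners_mem_aux]
  simp [PySem.Set.empty]

theorem pvB_partners_nodup_aux (index : PySem.Dict Int (PySem.Set Int)) (ch : List Int)
    (s0 : PySem.Set Int) (h : s0.Nodup) :
    (ch.foldl (fun s x => s.union (index.getD x PySem.Set.empty)) s0).Nodup := by
  induction ch generalizing s0 with
  | nil => exact h
  | cons c t ih => exact ih _ (PySem.Set.nodup_union _ _ h)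

theorem pvB_partners_nodup (index : PySem.Dict Int (PySem.Set Int)) (ch : List Int) :
    (pvB_partners index ch).Nodup := by
  exact pvB_partners_nodup_aux index ch _ List.nodup_nil

-- generic loop shapes
theorem pv_foldl_append_two {α : Type} (f : α → Int × Int) (g : α → Int × Int)
    (l : List α) (acc : List (Int × Int)) :
    l.foldl (fun acc x => acc ++ [f x] ++ [g x]) acc = acc ++ l.flatMap (fun x => [f x, g x]) := by
  induction l generalizing acc with
  | nil => simp
  | cons c t ih => rw [List.foldl_cons, ih]; simp

theorem pv_foldl_append_two_if {α : Type} (P : α → Prop) [DecidablePred P]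
    (f : α → Int × Int) (g : α → Int × Int) (l : List α) (acc : List (Int × Int)) :
    l.foldl (fun acc x => if P x then acc ++ [f x] ++ [g x] else acc) acc =
      acc ++ (l.filter (fun x => decide (P x))).flatMap (fun x => [f x, g x]) := by
  induction l generalizing acc with
  | nil => simp
  | cons c t ih =>
    rw [List.foldl_cons, ih]
    by_cases h : P c <;> simp [h]

-- A's arithmetic test is exactly "the two channels share an element"
theorem pvA_cond_iff (si sj : PySem.Set Int) (li lj : Int) :
    (li + lj - ((si.inter sj).map (fun _ => (1 : Int))).sum < li + lj) ↔
      ∃ x, x ∈ si ∧ x ∈ sj := by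
  rw [PySem.List.sum_map_const_int]
  constructor
  · intro h
    have hl : 0 < (si.inter sj).length := by omega
    obtain ⟨x, hx⟩ := List.exists_mem_of_length_pos hl
    exact ⟨x, (PySem.Set.mem_inter si sj x).mp hx⟩
  · intro ⟨x, hx⟩
    have hm : x ∈ si.inter sj := (PySem.Set.mem_inter si sj x).mpr hx
    have := List.length_pos_of_mem hm
    omega

-- the per-channel sorted partner list is A's filtered index range
theorem pv_inner_eq (U : List (List Int)) (i : Int) (h0 : 0 ≤ i) (h1 : i < (U.length : Int)) :
    PySem.List.sorted
        ((pvB_partners (pvB_index U) (PySem.List.pyGetD U i [])).filter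
          (fun q => decide (i ≤ q)))
        (fun x => x) =
      (PySem.List.pyRange i ((U.length : Int))).filter (fun j =>
        decide (PySem.List.pyGetD ((U.map PySem.Set.ofList).map PySem.Set.len) i 0 +
            PySem.List.pyGetD ((U.map PySem.Set.ofList).map PySem.Set.len) j 0 -
            (((PySem.List.pyGetD (U.map PySem.Set.ofList) i []).inter
                (PySem.List.pyGetD (U.map PySem.Set.ofList) j [])).map (fun _ => (1 : Int))).sum <
          PySem.List.pyGetD ((U.map PySem.Set.ofList).map PySem.Set.len) i 0 +
            PySem.List.pyGetD ((U.map PySem.Set.ofList).map PySem.Set.len) j 0)) := by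
  have hUi : PySem.List.pyGetD U i [] = U[i.toNat]'(by omega) := by
    rw [PySem.List.pyGetD_eq_getElem U [] h0 h1]
  have hUSi : PySem.List.pyGetD (U.map PySem.Set.ofList) i [] =
      PySem.Set.ofList (U[i.toNat]'(by omega)) := by
    rw [PySem.List.pyGetD_eq_getElem (U.map PySem.Set.ofList) [] h0 (by simpa using h1)]
    simp
  apply PySem.List.sorted_eq_of_perm_of_pairwise_lt
  · rw [List.perm_ext_iff_of_nodup
      (List.Nodup.filter _ (PySem.List.nodup_pyRange_one _ _))
      (List.Nodup.filter _ (pvB_partners_nodup _ _))]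
    intro a
    rw [List.mem_filter, List.mem_filter, PySem.List.mem_pyRange_one, pvB_partners_mem,
      decide_eq_true_iff, decide_eq_true_iff]
    constructor
    · rintro ⟨⟨hia, han⟩, hc⟩
      have ha0 : 0 ≤ a := le_trans h0 hia
      have hUSa : PySem.List.pyGetD (U.map PySem.Set.ofList) a [] =
          PySem.Set.ofList (U[a.toNat]'(by omega)) := by
        rw [PySem.List.pyGetD_eq_getElem (U.map PySem.Set.ofList) [] ha0 (by simpa using han)]
        simp
      rw [hUSi, hUSa, pvA_cond_iff] at hc
      obtain ⟨x, hxi, hxa⟩ := hc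
      rw [PySem.Set.mem_ofList] at hxi hxa
      refine ⟨⟨x, by rw [hUi]; exact hxi, ?_⟩, by simpa using hia⟩
      rw [pvB_index_mem]
      exact ⟨a.toNat, by omega, by omega, hxa⟩
    · rintro ⟨⟨x, hxi, hj⟩, hia⟩
      rw [pvB_index_mem] at hj
      obtain ⟨k, hk, rfl, hxk⟩ := hj
      refine ⟨⟨hia, by exact_mod_cast hk⟩, ?_⟩
      have hUSa : PySem.List.pyGetD (U.map PySem.Set.ofList) (k : Int) [] =
          PySem.Set.ofList (U[(k : Int).toNat]'(by simpa using hk)) := by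
        rw [PySem.List.pyGetD_eq_getElem (U.map PySem.Set.ofList) [] (by omega)
          (by simpa using hk)]
        simp
      rw [hUSi, hUSa, pvA_cond_iff]
      refine ⟨x, ?_, ?_⟩
      · rw [PySem.Set.mem_ofList]; rw [hUi] at hxi; exact hxi
      · rw [PySem.Set.mem_ofList]; simpa using hxk
  · exact (PySem.List.pairwise_lt_pyRange_one _ _).filter _

theorem pv_pairs_eq (U : List (List Int)) :
    (PySem.List.enumerate U).foldl (fun acc p =>
      (PySem.List.sorted ((pvB_partners (pvB_index U) p.2).filter (fun q => decide (p.1 ≤ q)))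
          (fun x => x)).foldl
        (fun acc j => acc ++ [(p.1, j)] ++ [(j, p.1)]) acc) [] =
    pvA_pairs (U.map PySem.Set.ofList) ((U.map PySem.Set.ofList).map PySem.Set.len)
      (PySem.List.len (U.map PySem.Set.ofList)) := by
  unfold pvA_pairs
  rw [PySem.List.enumerate_eq_map_pyRange U [], List.foldl_map]
  simp only [PySem.List.len, List.length_map]
  apply PySem.List.foldl_congr_mem
  intro acc i hi
  rw [PySem.List.mem_pyRange_one] at hi
  dsimp only
  rw [pv_foldl_append_two, pv_foldl_append_two_if]
  rw [pv_inner_eq U i hi.1 hi.2]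

-- ===== VERDICT (by name: the statement is the Claim_ definition above) =====
theorem get_overlapping_channels_spec : Claim_equal_get_overlapping_channels := by
  intro dc _
  unfold Spec_get_overlapping_channels
  unfold get_overlapping_channels get_overlapping_channels_alt
  rw [pvB_dedup_eq]
  exact Prod.ext (pv_pairs_eq (pvA_dedup (pvDictValues dc))).symm rfl
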